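-- pv_equiv track=rewrite | github.com/jcolinpatrick/kryptos | scripts/e_k4_simple_columnar_04.py | simple_columnar_rtl
-- ===== SOURCE A (Python) =====
-- def simple_columnar_rtl(ct, width):
--     """Write row-major, read columns right-to-left."""
--     if len(ct) % width != 0:
--         return None
--     nrows = len(ct) // width
--     pt = []
--     for col in range(width - 1, -1, -1):
--         for row in range(nrows):
--             pt.append(ct[row * width + col])
--     return ''.join(pt)
-- ===== SOURCE B (Python) =====
-- def simple_columnar_rtl(ct, width):
--     """Write row-major, read columns right-to-left."""
--     if len(ct) % width != 0:
--         return None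
--     rows = [ct[i:i + width] for i in range(0, len(ct), width)]
--     return ''.join(''.join(col) for col in reversed(list(zip(*rows))))
-- ===== Notes on version B (the rewrite author's own statement) =====
-- stated objective: alternative
-- what changed: B builds an explicit 2-D grid of row slices and transposes it with zip, concatenating the transposed columns in reverse order, instead of A's nested index loops computing flat offsets row*width+col.
import Mathlib
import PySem

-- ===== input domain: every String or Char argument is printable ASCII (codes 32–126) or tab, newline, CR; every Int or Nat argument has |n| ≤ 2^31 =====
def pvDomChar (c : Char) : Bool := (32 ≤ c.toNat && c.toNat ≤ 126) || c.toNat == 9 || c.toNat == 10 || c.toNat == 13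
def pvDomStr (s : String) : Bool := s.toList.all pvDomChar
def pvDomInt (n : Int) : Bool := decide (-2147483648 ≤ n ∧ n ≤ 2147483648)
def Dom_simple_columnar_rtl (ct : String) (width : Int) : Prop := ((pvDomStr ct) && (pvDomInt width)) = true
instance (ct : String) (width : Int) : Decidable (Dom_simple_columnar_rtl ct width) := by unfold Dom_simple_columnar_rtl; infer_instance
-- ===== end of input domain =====

-- B replaces A's nested flat-index loops (pt.append(ct[row*width+col])) by building
-- the grid as a list of row slices and transposing it with zip, concatenating the
-- transposed columns in reverse order (objective: alternative decomposition, same cost).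


-- ===== PORT A =====
-- Literal port of A.  ct[row*width+col] is PySem.Str.pyGet?; after the modulo guard
-- the index is always in range, so the 'none' (IndexError) branch of Option.toList
-- is unreachable.
def simple_columnar_rtl (ct : String) (width : Int) : Option String :=
  if PySem.Int.mod (PySem.Str.len ct) width ≠ 0 then none
  else
    let nrows := PySem.Int.floordiv (PySem.Str.len ct) width
    let pt := (PySem.List.pyRange (width - 1) (-1) (-1)).foldl (fun acc col =>
      (PySem.List.pyRange 0 nrows 1).foldl (fun acc2 row =>
        acc2 ++ (PySem.Str.pyGet? ct (row * width + col)).toList) acc) []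
    some (String.ofList pt)

-- ===== PORT B =====
-- Python's zip(*rows): emit the tuple of heads while every row is still nonempty.
def pyZipT (rows : List (List Char)) : List (List Char) :=
  if h : rows ≠ [] ∧ ∀ r ∈ rows, r ≠ [] then
    (rows.map (fun r => r.headD ' ')) :: pyZipT (rows.map List.tail)
  else []
termination_by (rows.headD []).length
decreasing_by
  obtain ⟨hne, hall⟩ := h
  match rows with
  | r :: rs =>
    have hr : r ≠ [] := hall r (by simp)
    cases r with
    | nil => exact absurd rfl hr
    | cons a t => simp [List.headD]

def simple_columnar_rtl_alt (ct : String) (width : Int) : Option String :=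
  if PySem.Int.mod (PySem.Str.len ct) width ≠ 0 then none
  else
    let rows := (PySem.List.pyRange 0 (PySem.Str.len ct) width).map
      (fun i => (PySem.Str.slice ct (some i) (some (i + width))).toList)
    some (String.ofList ((pyZipT rows).reverse.flatten))

-- ===== PRECONDITION & SPEC =====
-- Pre_ excludes only width = 0, where the Python A raises ZeroDivisionError.
def Pre_simple_columnar_rtl (ct : String) (width : Int) : Prop := width ≠ 0
instance (ct : String) (width : Int) : Decidable (Pre_simple_columnar_rtl ct width) := by unfold Pre_simple_columnar_rtl; infer_instance
def pvWitness_simple_columnar_rtl : String × Int := ("abcdef", 3)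
def Spec_simple_columnar_rtl (ct : String) (width : Int) (out : Option String) : Prop := out = simple_columnar_rtl_alt ct width
instance (ct : String) (width : Int) (out : Option String) : Decidable (Spec_simple_columnar_rtl ct width out) := by unfold Spec_simple_columnar_rtl; infer_instance

-- ===== CLAIM (what is proved, stated in full; the proofs are below) =====
def Claim_equal_simple_columnar_rtl : Prop := ∀ (ct : String) (width : Int), Dom_simple_columnar_rtl ct width → Pre_simple_columnar_rtl ct width → Spec_simple_columnar_rtl ct width (simple_columnar_rtl ct width)

-- ===== LEMMAS AND PROOFS =====

theorem zipT_eq (w : ℕ) (rows : List (List Char)) (hne : rows ≠ [])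
    (hlen : ∀ r ∈ rows, r.length = w) :
    pyZipT rows = (List.range w).map (fun c => rows.map (fun r => r.getD c ' ')) := by
  induction w generalizing rows with
  | zero =>
    rw [pyZipT, dif_neg]
    · simp
    · rintro ⟨-, hall⟩
      match rows with
      | r :: rs =>
        have h1 := hlen r (by simp)
        have h2 := hall r (by simp)
        rw [List.length_eq_zero_iff] at h1
        exact h2 h1
  | succ m ih =>
    rw [pyZipT, dif_pos ⟨hne, fun r hr h => by have := hlen r hr; rw [h] at this; simp at this⟩]
    have htail : ∀ r ∈ rows.map List.tail, r.length = m := by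
      intro r hr
      simp only [List.mem_map] at hr
      obtain ⟨s, hs, rfl⟩ := hr
      have := hlen s hs
      simp [List.length_tail, this]
    have hne' : rows.map List.tail ≠ [] := by simp [hne]
    rw [ih _ hne' htail, List.range_succ_eq_map]
    simp only [List.map_cons, List.map_map, Function.comp_def]
    congr 1
    · apply List.map_congr_left
      intro r hr
      have h := hlen r hr
      cases r with
      | nil => simp at h
      | cons a t => rfl
    · apply List.map_congr_left
      intro c _
      apply List.map_congr_left
      intro r hr
      have h := hlen r hr
      cases r with
      | nil => simp at h
      | cons a t => rfl

theorem inner_eq (ct : String) (q w c : ℕ) (hc : c < w)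
    (hlen : ct.toList.length = q * w) (acc : List Char) :
    (PySem.List.pyRange 0 (q : ℤ) 1).foldl (fun acc2 row =>
        acc2 ++ (PySem.Str.pyGet? ct (row * (w : ℤ) + (c : ℤ))).toList) acc
    = acc ++ (List.range q).map (fun r => ct.toList.getD (r * w + c) ' ') := by
  rw [PySem.List.pyRange_one, Int.sub_zero, Int.toNat_natCast, List.foldl_map]
  rw [PySem.List.foldl_congr_mem _ _
      (fun acc2 k => acc2 ++ [ct.toList.getD (k * w + c) ' ']) acc ?_]
  · exact PySem.List.foldl_append_singleton_eq_map _ _ _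
  · intro acc2 k hk
    rw [List.mem_range] at hk
    have hidx : k * w + c < ct.toList.length := by
      rw [hlen]; calc k * w + c < k * w + w := by omega
        _ = (k + 1) * w := by ring
        _ ≤ q * w := Nat.mul_le_mul_right w (by omega)
    have hcast : (0 + (k : ℤ)) * (w : ℤ) + (c : ℤ) = ((k * w + c : ℕ) : ℤ) := by push_cast; ring
    rw [hcast, PySem.Str.pyGet?_natCast, List.getElem?_eq_getElem hidx]
    simp [List.getElem?_eq_getElem hidx]

theorem A_flat (ct : String) (q w : ℕ) (hw : 0 < w) (hlen : ct.toList.length = q * w) :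
    (PySem.List.pyRange ((w : ℤ) - 1) (-1) (-1)).foldl (fun acc col =>
      (PySem.List.pyRange 0 (q : ℤ) 1).foldl (fun acc2 row =>
        acc2 ++ (PySem.Str.pyGet? ct (row * (w : ℤ) + col)).toList) acc) []
    = (List.range w).flatMap (fun k => (List.range q).map (fun r => ct.toList.getD (r * w + (w - 1 - k)) ' ')) := by
  rw [PySem.List.pyRange_neg_one]
  have hcnt : ((w : ℤ) - 1 - (-1)).toNat = w := by omega
  rw [hcnt, List.foldl_map]
  rw [PySem.List.foldl_congr_mem _ _
      (fun acc k => acc ++ (List.range q).map (fun r => ct.toList.getD (r * w + (w - 1 - k)) ' ')) [] ?_]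
  · rw [PySem.List.foldl_append_eq_flatMap]
    simp
  · intro acc k hk
    rw [List.mem_range] at hk
    have hcast : (w : ℤ) - 1 - (k : ℤ) = ((w - 1 - k : ℕ) : ℤ) := by push_cast [Nat.sub_sub]; omega
    rw [hcast]
    exact inner_eq ct q w (w - 1 - k) (by omega) hlen acc

theorem count_eq (q w : ℕ) (hw : 0 < w) :
    ((((q * w : ℕ) : ℤ) - 0 + w - 1) / w).toNat = q := by
  have h1 : ((q * w : ℕ) : ℤ) - 0 + w - 1 = ((q * w + w - 1 : ℕ) : ℤ) := by push_cast; omega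
  have h2 : (q * w + w - 1 : ℕ) / w = q := by
    have h3 : q * w + w - 1 = (w - 1) + q * w := by omega
    rw [h3, Nat.add_mul_div_right _ _ hw, Nat.div_eq_of_lt (by omega), Nat.zero_add]
  rw [h1, ← Int.natCast_div, h2, Int.toNat_natCast]

theorem rangeB_eq (q w : ℕ) (hw : 0 < w) :
    PySem.List.pyRange 0 ((q * w : ℕ) : ℤ) (w : ℤ)
    = (List.range q).map (fun r => ((r * w : ℕ) : ℤ)) := by
  rw [PySem.List.pyRange_of_pos 0 _ (by exact_mod_cast hw)]
  have hcount : (if (0 : ℤ) < ((q * w : ℕ) : ℤ) then ((((q * w : ℕ) : ℤ) - 0 + w - 1) / w).toNat else 0) = q := by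
    by_cases h : (0 : ℤ) < ((q * w : ℕ) : ℤ)
    · rw [if_pos h]; exact count_eq q w hw
    · rw [if_neg h]
      have h0 : q * w = 0 := by omega
      rcases Nat.mul_eq_zero.mp h0 with h' | h'
      · omega
      · omega
  rw [hcount]
  apply List.map_congr_left
  intro k _
  push_cast
  ring

theorem range_reverse_eq_map (n : ℕ) :
    (List.range n).reverse = (List.range n).map (fun k => n - 1 - k) := by
  rw [List.range_eq_range', List.reverse_range']
  simp [List.range_eq_range']

theorem getD_take_drop (L : List Char) (j w c : ℕ) (hc : c < w) :
    ((L.drop j).take w).getD c ' ' = L.getD (j + c) ' ' := by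
  simp only [List.getD_eq_getElem?_getD]
  rw [List.getElem?_take_of_lt hc, List.getElem?_drop]

theorem B_flat (ct : String) (q w : ℕ) (hw : 0 < w) (hlen : ct.toList.length = q * w) :
    (pyZipT (((List.range q).map (fun r => ((r * w : ℕ) : ℤ))).map
      (fun i => (PySem.Str.slice ct (some i) (some (i + (w : ℤ)))).toList))).reverse.flatten
    = (List.range w).flatMap (fun k => (List.range q).map (fun r => ct.toList.getD (r * w + (w - 1 - k)) ' ')) := by
  have hrows : (((List.range q).map (fun r => ((r * w : ℕ) : ℤ))).map
      (fun i => (PySem.Str.slice ct (some i) (some (i + (w : ℤ)))).toList))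
      = (List.range q).map (fun r => (ct.toList.drop (r * w)).take w) := by
    rw [List.map_map]
    apply List.map_congr_left
    intro r _
    show (PySem.Str.slice ct (some ((r * w : ℕ) : ℤ)) (some (((r * w : ℕ) : ℤ) + (w : ℤ)))).toList = _
    simp only [PySem.Str.slice, String.toList_ofList]
    exact PySem.List.slice_natCast_add ct.toList (r * w) w
  rw [hrows]
  rcases Nat.eq_zero_or_pos q with hq | hq
  · subst hq
    simp only [List.range_zero, List.map_nil]
    rw [pyZipT, dif_neg (by simp)]
    simp
  · have hne : (List.range q).map (fun r => (ct.toList.drop (r * w)).take w) ≠ [] := by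
      simp [List.range_eq_nil]
      omega
    have hl : ∀ r ∈ (List.range q).map (fun r => (ct.toList.drop (r * w)).take w), r.length = w := by
      intro r hr
      simp only [List.mem_map, List.mem_range] at hr
      obtain ⟨s, hs, rfl⟩ := hr
      rw [List.length_take, List.length_drop, hlen]
      have : s * w + w ≤ q * w := by
        calc s * w + w = (s + 1) * w := by ring
          _ ≤ q * w := Nat.mul_le_mul_right w (by omega)
      omega
    rw [zipT_eq w _ hne hl]
    rw [← List.map_reverse, range_reverse_eq_map, List.map_map, ← List.flatMap_def]
    rw [List.flatMap_def, List.flatMap_def]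
    congr 1
    apply List.map_congr_left
    intro k hk
    rw [List.mem_range] at hk
    simp only [Function.comp_def, List.map_map]
    apply List.map_congr_left
    intro s _
    exact getD_take_drop ct.toList (s * w) w (w - 1 - k) (by omega)

theorem pyRange_neg_empty (n w : Int) (hw : w < 0) (hn : 0 ≤ n) :
    PySem.List.pyRange 0 n w = [] := by
  simp [PySem.List.pyRange]
  intro _
  rw [if_neg (by omega), if_neg (by omega)]

theorem floordiv_mul (q w : ℕ) (hw : 0 < w) :
    PySem.Int.floordiv ((q * w : ℕ) : ℤ) (w : ℤ) = (q : ℤ) := by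
  have hw' : (w : ℤ) ≠ 0 := by exact_mod_cast hw.ne'
  simp only [PySem.Int.floordiv]
  exact Int.mul_fdiv_cancel (q : ℤ) hw'

-- ===== VERDICT (by name: the statement is the Claim_ definition above) =====
theorem simple_columnar_rtl_spec : Claim_equal_simple_columnar_rtl := by
  intro ct width _hdom hpre
  unfold Spec_simple_columnar_rtl
  unfold simple_columnar_rtl simple_columnar_rtl_alt
  by_cases hm : PySem.Int.mod (PySem.Str.len ct) width = 0
  · rw [if_neg (by simpa using hm), if_neg (by simpa using hm)]
    rcases lt_trichotomy width 0 with hlt | heq | hgt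
    · -- negative width: both loops are empty
      have hA : PySem.List.pyRange (width - 1) (-1) (-1) = [] := by
        rw [PySem.List.pyRange_neg_one]
        have : (width - 1 - (-1)).toNat = 0 := by omega
        rw [this, List.range_zero, List.map_nil]
      have hn : 0 ≤ PySem.Str.len ct := by rw [PySem.Str.len_eq]; positivity
      have hB : PySem.List.pyRange 0 (PySem.Str.len ct) width = [] :=
        pyRange_neg_empty _ _ hlt hn
      rw [hA, hB]
      simp [pyZipT]
    · exact absurd heq hpre
    · -- positive width
      obtain ⟨w, rfl⟩ : ∃ w : ℕ, width = (w : ℤ) := ⟨width.toNat, by omega⟩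
      have hw : 0 < w := by exact_mod_cast hgt
      rw [PySem.Int.mod_eq_zero_iff_dvd] at hm
      rw [PySem.Str.len_eq] at hm ⊢
      obtain ⟨k, hk⟩ := hm
      have hk0 : 0 ≤ k := by
        have h1 : (0 : ℤ) ≤ (w : ℤ) * k := hk ▸ Int.natCast_nonneg _
        nlinarith
      obtain ⟨q, rfl⟩ : ∃ q : ℕ, k = (q : ℤ) := ⟨k.toNat, by omega⟩
      have hlen : ct.toList.length = q * w := by
        have h2 : (ct.toList.length : ℤ) = ((q * w : ℕ) : ℤ) := by push_cast; rw [hk]; ring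
        exact_mod_cast h2
      have hcast : (ct.toList.length : ℤ) = ((q * w : ℕ) : ℤ) := by exact_mod_cast hlen
      simp only []
      rw [hcast, floordiv_mul q w hw, rangeB_eq q w hw]
      rw [A_flat ct q w hw hlen, B_flat ct q w hw hlen]
  · rw [if_pos hm, if_pos hm]
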